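-- pv_equiv track=rewrite | github.com/ChoAnLee/Freshman_Computer_Science | A3-110403516.py | CreatePyramid
-- ===== SOURCE A (Python) =====
-- def CreatePyramid(column):
--     ans_string = ''
--     for i in range(1, column + 1):
--         for k in range(1, column - i + 1):
--             ans_string += ' '
--         if i == 1:
--             ans_string += '1'  # avoid the first line in isPrime function
--         else:
--             for j in range(i**2-(i-1)*2, i ** 2 + 1):
--                 ans_string += isPrime(j)
--         if (i != column):
--             ans_string += '\n'  # avoid the last line has '\n'
--     return ans_string
--
-- def isPrime(number):
--     if number == 1:
--         return 1
--     for i in range(2, number):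
--         if number % i == 0:
--             return 'N'
--     return 'Y'
-- ===== SOURCE B (Python) =====
-- def _is_prime(n):
--     if n < 2:
--         return False
--     d = 2
--     while d * d <= n:
--         if n % d == 0:
--             return False
--         d += 1
--     return True
--
-- def CreatePyramid(column):
--     rows = []
--     for i in range(1, column + 1):
--         if i == 1:
--             body = '1'
--         else:
--             body = ''.join('Y' if _is_prime(j) else 'N'
--                            for j in range(i * i - 2 * i + 2, i * i + 1))
--         rows.append(' ' * (column - i) + body)
--     return '\n'.join(rows)
-- ===== Notes on version B (the rewrite author's own statement) =====
-- stated objective: faster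
-- what changed: Primality is decided by trial division only up to sqrt(j) instead of all of 2..j-1, and the output is assembled as a list of row strings joined with newline instead of character-by-character string concatenation.
import Mathlib
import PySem

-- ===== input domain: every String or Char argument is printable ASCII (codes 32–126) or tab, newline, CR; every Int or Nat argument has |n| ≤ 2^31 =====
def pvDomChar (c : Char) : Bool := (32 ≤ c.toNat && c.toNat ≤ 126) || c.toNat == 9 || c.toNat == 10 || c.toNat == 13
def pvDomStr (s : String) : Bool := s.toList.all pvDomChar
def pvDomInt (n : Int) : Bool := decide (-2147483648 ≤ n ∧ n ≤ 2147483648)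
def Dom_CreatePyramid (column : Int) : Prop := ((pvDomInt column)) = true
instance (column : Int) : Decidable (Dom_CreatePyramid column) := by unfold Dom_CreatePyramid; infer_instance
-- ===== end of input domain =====

-- B replaces A's full trial division over 2..j-1 by trial division up to sqrt(j) and joins
-- precomputed row strings with '\n' instead of appending character by character.

-- ===== PORT A =====
-- isPrime: 'for i in range(2, number): if number % i == 0: return "N"' then 'return "Y"';
-- the early-return scan is ported as List.any over the same range (first hit decides the result).
-- The 'number == 1' branch returns the int 1 in Python; it is unreachable from CreatePyramid
-- (i == 1 is special-cased there); ported as the char '1'.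
def pvIsPrimeA (number : Int) : List Char :=
  if number == 1 then ['1']
  else if (PySem.List.pyRange 2 number 1).any (fun i => PySem.Int.mod number i == 0) then ['N']
  else ['Y']

-- the body of A's outer 'for i in range(1, column+1)' loop, as a named helper;
-- the string accumulator is carried as a List Char and packed by String.ofList at the end
def pvStepA (column : Int) (ans : List Char) (i : Int) : List Char :=
  let ans := (PySem.List.pyRange 1 (column - i + 1) 1).foldl (fun a _ => a ++ [' ']) ans
  let ans :=
    if i == 1 then ans ++ ['1']
    else (PySem.List.pyRange (i ^ 2 - (i - 1) * 2) (i ^ 2 + 1) 1).foldl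
      (fun a j => a ++ pvIsPrimeA j) ans
  if i != column then ans ++ ['\n'] else ans

def CreatePyramid (column : Int) : String :=
  String.ofList ((PySem.List.pyRange 1 (column + 1) 1).foldl (pvStepA column) [])

-- ===== PORT B =====
-- Source B's '_is_prime': the 'while d * d <= n' loop (the counter d = 2, 3, … is carried as a Nat)
def pvIsPrimeLoop (n : Int) (d : Nat) : Bool :=
  if h : (d : Int) * d ≤ n then
    if PySem.Int.mod n d == 0 then false else pvIsPrimeLoop n (d + 1)
  else true
termination_by n.toNat + 1 - d
decreasing_by
  have hdd : d ≤ d * d := by cases d with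
    | zero => simp
    | succ m => exact Nat.le_mul_of_pos_left _ (Nat.succ_pos m)
  have : (d : Int) ≤ n := le_trans (by exact_mod_cast hdd) h
  omega

def pvIsPrimeB (n : Int) : Bool := if n < 2 then false else pvIsPrimeLoop n 2

-- one row of Source B: ' ' * (column - i) + body  (negative repeat count gives the empty string)
def pvRowB (column i : Int) : List Char :=
  List.replicate (column - i).toNat ' ' ++
    (if i == 1 then ['1']
     else (PySem.List.pyRange (i * i - 2 * i + 2) (i * i + 1) 1).map
       (fun j => if pvIsPrimeB j then 'Y' else 'N'))

def CreatePyramid_alt (column : Int) : String :=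
  String.ofList (PySem.Chars.join ['\n']
    ((PySem.List.pyRange 1 (column + 1) 1).map (pvRowB column)))

-- ===== PRECONDITION & SPEC =====
def Spec_CreatePyramid (column : Int) (out : String) : Prop := out = CreatePyramid_alt column
instance (column : Int) (out : String) : Decidable (Spec_CreatePyramid column out) := by unfold Spec_CreatePyramid; infer_instance

-- ===== CLAIM (what is proved, stated in full; the proofs are below) =====
def Claim_equal_CreatePyramid : Prop := ∀ (column : Int), Dom_CreatePyramid column → Spec_CreatePyramid column (CreatePyramid column)

-- ===== LEMMAS AND PROOFS =====

-- B's loop returns true iff no candidate d ≤ e with e² ≤ n divides n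
lemma pvIsPrimeLoop_iff (n : Int) (d : Nat) :
    pvIsPrimeLoop n d = true ↔ ∀ e : Nat, d ≤ e → (e : Int) * e ≤ n → ¬ (e : Int) ∣ n := by
  fun_induction pvIsPrimeLoop n d with
  | case1 d h hm =>
    simp only [Bool.false_eq_true, false_iff]
    push Not
    exact ⟨d, le_rfl, h, (PySem.Int.mod_eq_zero_iff_dvd n d).mp (by simpa using hm)⟩
  | case2 d h hm ih =>
    rw [ih]
    constructor
    · intro H e hde he
      rcases Nat.lt_or_ge d e with h' | h'
      · exact H e h' he
      · have : e = d := le_antisymm h' hde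
        subst this
        intro hdvd
        exact hm (by simpa using (PySem.Int.mod_eq_zero_iff_dvd n e).mpr hdvd)
    · intro H e hde he
      exact H e (by omega) he
  | case3 d h =>
    simp only [true_iff]
    intro e hde he
    exfalso
    apply h
    calc (d : Int) * d ≤ (e : Int) * e := by
          have : d * d ≤ e * e := Nat.mul_le_mul hde hde
          exact_mod_cast this
      _ ≤ n := he

-- B's test decides primality of n.toNat for n ≥ 2 (sqrt-bounded trial division is complete)
lemma pvIsPrimeB_iff (n : Int) (h2 : 2 ≤ n) : pvIsPrimeB n = true ↔ n.toNat.Prime := by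
  have hn : ((n.toNat : Int)) = n := Int.toNat_of_nonneg (by omega)
  rw [pvIsPrimeB, if_neg (by omega), pvIsPrimeLoop_iff, Nat.prime_def_le_sqrt]
  constructor
  · intro H
    refine ⟨by omega, fun m hm hms hdvd => ?_⟩
    refine H m hm ?_ ?_
    · have := (Nat.le_sqrt.mp hms)
      calc ((m : Int) * m) = ((m * m : Nat) : Int) := by push_cast; ring
        _ ≤ ((n.toNat : Nat) : Int) := by exact_mod_cast this
        _ = n := hn
    · rw [← hn]; exact_mod_cast hdvd
  · intro ⟨_, H⟩ e he hee hdvd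
    refine H e he ?_ ?_
    · rw [Nat.le_sqrt]
      have : ((e * e : Nat) : Int) ≤ (n.toNat : Int) := by rw [hn]; push_cast; linarith
      exact_mod_cast this
    · rw [← hn] at hdvd; exact_mod_cast hdvd

-- A's full scan over 2..n-1 agrees with B's sqrt-bounded test on every n ≥ 2
lemma pvIsPrimeA_eq (n : Int) (h2 : 2 ≤ n) :
    pvIsPrimeA n = [if pvIsPrimeB n then 'Y' else 'N'] := by
  have hn : ((n.toNat : Int)) = n := Int.toNat_of_nonneg (by omega)
  have hany : (PySem.List.pyRange 2 n 1).any (fun i => PySem.Int.mod n i == 0) = !pvIsPrimeB n := by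
    by_cases hp : pvIsPrimeB n = true
    · rw [hp]
      simp only [Bool.not_true, List.any_eq_false]
      intro i hi
      rw [PySem.List.mem_pyRange_one] at hi
      simp only [beq_iff_eq]
      rw [PySem.Int.mod_eq_zero_iff_dvd]
      have hprime := (pvIsPrimeB_iff n h2).mp hp
      intro hdvd
      have hipos : 0 < i := by omega
      have hidvd : i.toNat ∣ n.toNat := by
        rw [← hn] at hdvd
        have : ((i.toNat : Int)) = i := Int.toNat_of_nonneg (by omega)
        rw [← this] at hdvd
        exact_mod_cast hdvd
      rcases (Nat.Prime.eq_one_or_self_of_dvd hprime _ hidvd) with h | h <;> omega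
    · have hnp : ¬ n.toNat.Prime := fun hc => hp ((pvIsPrimeB_iff n h2).mpr hc)
      rw [Bool.not_eq_true] at hp
      rw [hp]
      simp only [Bool.not_false, List.any_eq_true]
      rw [Nat.prime_def_lt'] at hnp
      push Not at hnp
      obtain ⟨m, hm2, hmlt, hmdvd⟩ := hnp (by omega)
      refine ⟨(m : Int), ?_, ?_⟩
      · rw [PySem.List.mem_pyRange_one]
        constructor
        · exact_mod_cast hm2
        · calc ((m : Int)) < (n.toNat : Int) := by exact_mod_cast hmlt
            _ = n := hn
      · simp only [beq_iff_eq]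
        rw [PySem.Int.mod_eq_zero_iff_dvd, ← hn]
        exact_mod_cast hmdvd
  rw [pvIsPrimeA, if_neg (by simp; omega), hany]
  by_cases hp : pvIsPrimeB n = true <;> simp [hp]

-- one step of A's outer loop = B's row, plus '\n' unless it is the last row
lemma pvStepA_eq (column i : Int) (acc : List Char) (h1 : 1 ≤ i) (h2 : i ≤ column) :
    pvStepA column acc i = acc ++ pvRowB column i ++ (if i = column then [] else ['\n']) := by
  have hsp : ∀ a : List Char, (PySem.List.pyRange 1 (column - i + 1) 1).foldl (fun a _ => a ++ [' ']) a
      = a ++ List.replicate (column - i).toNat ' ' := by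
    intro a
    rw [PySem.List.foldl_append_singleton_eq_map (f := fun _ => ' '), List.map_const',
      PySem.List.length_pyRange_one]
    congr 2
    omega
  have hflat : (PySem.List.pyRange (i * i - 2 * i + 2) (i * i + 1) 1).flatMap pvIsPrimeA
      = (PySem.List.pyRange (i * i - 2 * i + 2) (i * i + 1) 1).map
        (fun j => if pvIsPrimeB j then 'Y' else 'N') ∨ i = 1 := by
    by_cases hi1 : i = 1
    · right; exact hi1
    · left
      rw [List.flatMap_congr (g := fun j => [if pvIsPrimeB j then 'Y' else 'N'])
        (fun j hj => pvIsPrimeA_eq j (by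
          rw [PySem.List.mem_pyRange_one] at hj
          have hi2 : 2 ≤ i := by omega
          nlinarith [hj.1, mul_nonneg (sub_nonneg.mpr hi2) (by omega : (0:Int) ≤ i)]))]
      exact (List.map_eq_flatMap).symm
  simp only [pvStepA]
  rw [hsp]
  by_cases hi1 : i = 1
  · subst hi1
    by_cases hc : (1 : Int) = column
    · simp [pvRowB, ← hc]
    · have : ((1 : Int) != column) = true := by simpa using hc
      simp [pvRowB, this, hc]
  · have hne : (i == (1 : Int)) = false := by simpa using hi1
    have hlo : i ^ 2 - (i - 1) * 2 = i * i - 2 * i + 2 := by ring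
    have hhi : i ^ 2 + 1 = i * i + 1 := by ring
    rw [hne]
    simp only [Bool.false_eq_true, if_false, hlo, hhi, PySem.List.foldl_append_eq_flatMap]
    rcases hflat with hflat | hbad
    · rw [hflat]
      by_cases hc : i = column
      · subst hc
        simp [pvRowB, hne]
      · have : (i != column) = true := by simpa using hc
        rw [this]
        simp [pvRowB, hne, hc]
    · exact absurd hbad hi1

-- A's whole loop from row a to row column = the '\n'-join of B's rows from a
lemma pvOuter (column : Int) (k : Nat) :
    ∀ (a : Int) (acc : List Char), a + k = column + 1 → 1 ≤ a → a ≤ column →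
    (PySem.List.pyRange a (column + 1) 1).foldl (pvStepA column) acc
      = acc ++ PySem.Chars.join ['\n'] ((PySem.List.pyRange a (column + 1) 1).map (pvRowB column)) := by
  induction k with
  | zero => intro a acc hk h1 h2; omega
  | succ k ih =>
    intro a acc hk h1 h2
    rw [PySem.List.pyRange_one_cons (by omega)]
    simp only [List.foldl_cons, List.map_cons]
    by_cases hc : a = column
    · subst hc
      rw [PySem.List.pyRange_one_eq_nil (by omega)]
      simp only [List.foldl_nil, List.map_nil]
      rw [pvStepA_eq _ _ _ h1 le_rfl, if_pos rfl]
      rw [PySem.Chars.join_singleton]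
      simp
    · have hlt : a < column := by omega
      rw [ih (a + 1) _ (by omega) (by omega) (by omega)]
      rw [pvStepA_eq _ _ _ h1 h2, if_neg hc]
      rw [PySem.List.pyRange_one_cons (show a + 1 < column + 1 by omega)]
      simp only [List.map_cons]
      rw [PySem.Chars.join_cons_cons]
      simp [List.append_assoc]

-- ===== VERDICT (by name: the statement is the Claim_ definition above) =====
theorem CreatePyramid_spec : Claim_equal_CreatePyramid := by
  intro column _
  unfold Spec_CreatePyramid CreatePyramid CreatePyramid_alt
  by_cases h : 1 ≤ column
  · rw [pvOuter column (column + 1 - 1).toNat 1 [] (by omega) le_rfl h]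
    simp
  · rw [PySem.List.pyRange_one_eq_nil (by omega)]
    simp [PySem.Chars.join, List.intercalate]
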